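-- pv_equiv track=rewrite | github.com/Sandropython/appmaps-web | telefones_service.py | _proximo_indice_variacao
-- ===== SOURCE A (Python) =====
-- from typing import Dict, Tuple, List, Any
--
-- def _prefixo_chaves(base: Dict[str, Dict[str, str]], chave: str) -> List[str]:
--     """Retorna todas as chaves que são =chave ou começam com chave + "__"."""
--     return [k for k in base.keys() if k == chave or k.startswith(chave + "__")]
--
-- def _proximo_indice_variacao(base: Dict[str, Dict[str, str]], chave: str) -> int:
--     indices = {0}
--     for k in _prefixo_chaves(base, chave):
--         if k != chave and "__" in k:
--             try:
--                 indices.add(int(k.split("__", 1)[1]))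
--             except Exception:
--                 pass
--     n = 1
--     while n in indices:
--         n += 1
--     return n
-- ===== SOURCE B (Python) =====
-- def _proximo_indice_variacao(base, chave):
--     prefixo = chave + "__"
--     usados = set()
--     for k in base:
--         if k.startswith(prefixo):
--             try:
--                 usados.add(int(k.split("__", 1)[1]))
--             except ValueError:
--                 pass
--     n = 1
--     for v in sorted(usados):
--         if v == n:
--             n += 1
--         elif v > n:
--             break
--     return n
-- ===== Notes on version B (the rewrite author's own statement) =====
-- stated objective: alternative
-- what changed: Replaces A's seeded-set ({0}) plus increment-while-member probing loop with collecting the parsed suffix indices once into a set and finding the smallest missing positive by a single gap-scan over the sorted unique values; A's intermediate _prefixo_chaves list and its redundant k != chave and '__' in k re-checks are dropped, since startswith(chave + '__') already implies both.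
import Mathlib
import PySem

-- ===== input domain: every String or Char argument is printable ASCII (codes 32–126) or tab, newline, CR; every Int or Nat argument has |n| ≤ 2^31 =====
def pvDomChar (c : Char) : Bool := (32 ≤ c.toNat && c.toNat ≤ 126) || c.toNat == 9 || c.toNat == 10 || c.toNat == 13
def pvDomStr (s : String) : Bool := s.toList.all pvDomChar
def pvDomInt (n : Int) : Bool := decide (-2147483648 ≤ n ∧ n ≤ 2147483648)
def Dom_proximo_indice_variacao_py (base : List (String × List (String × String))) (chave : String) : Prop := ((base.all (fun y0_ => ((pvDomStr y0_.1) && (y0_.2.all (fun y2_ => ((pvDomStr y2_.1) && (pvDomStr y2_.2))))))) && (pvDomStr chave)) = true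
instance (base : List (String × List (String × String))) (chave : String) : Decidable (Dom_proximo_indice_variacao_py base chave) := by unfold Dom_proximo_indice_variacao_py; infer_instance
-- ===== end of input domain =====

-- B replaces A's seeded-set / increment-while-member probing loop by one gap-scan over the
-- sorted unique parsed suffix indices (objective: alternative algorithm, same cost class).

-- ===== PORT A =====

-- the keys of the Python dict argument, in insertion order (shared input decoding)
def pvKeys (base : List (String × List (String × String))) : List String :=
  PySem.Set.ofList (base.map (·.1))

-- int(k.split("__", 1)[1]) — none exactly where Python raises (IndexError / ValueError)
def pvParse (k : String) : Option Int :=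
  match PySem.Str.splitMax? k "__" 1 with
  | some parts =>
    match PySem.List.pyGet? parts 1 with
    | some suf => PySem.Int.ofStr? suf
    | none => none
  | none => none

-- _prefixo_chaves
def pvPrefixoChaves (base : List (String × List (String × String))) (chave : String) : List String :=
  (pvKeys base).filter (fun k => k == chave || PySem.Str.startswith k (chave ++ "__"))

-- 'n = 1; while n in indices: n += 1' (fuel ≥ possible iterations is supplied at the call)
def pvWhileA (indices : PySem.Set Int) : Nat → Int → Int
  | 0, n => n
  | fuel + 1, n => if PySem.Set.contains indices n then pvWhileA indices fuel (n + 1) else n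

def proximo_indice_variacao_py (base : List (String × List (String × String))) (chave : String) : Int :=
  let indices : PySem.Set Int :=
    (pvPrefixoChaves base chave).foldl
      (fun s k =>
        if (!(k == chave) && PySem.Str.isIn "__" k) then
          match pvParse k with
          | some v => PySem.Set.add s v
          | none => s
        else s)
      (PySem.Set.ofList [0])
  pvWhileA indices (indices.length + 1) 1

-- ===== PORT B =====

-- 'n = 1; for v in vals: if v == n: n += 1; elif v > n: break; return n'
def pvScanB : List Int → Int → Int
  | [], n => n
  | v :: vs, n =>
    if v == n then pvScanB vs (n + 1)
    else if v > n then n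
    else pvScanB vs n

def proximo_indice_variacao_py_alt (base : List (String × List (String × String))) (chave : String) : Int :=
  let usados : PySem.Set Int :=
    (pvKeys base).foldl
      (fun s k =>
        if PySem.Str.startswith k (chave ++ "__") then
          match pvParse k with
          | some v => PySem.Set.add s v
          | none => s
        else s)
      PySem.Set.empty
  pvScanB (PySem.List.sorted usados (fun x => x) false) 1

-- ===== PRECONDITION & SPEC =====
def Spec_proximo_indice_variacao_py (base : List (String × List (String × String))) (chave : String) (out : Int) : Prop := out = proximo_indice_variacao_py_alt base chave
instance (base : List (String × List (String × String))) (chave : String) (out : Int) : Decidable (Spec_proximo_indice_variacao_py base chave out) := by unfold Spec_proximo_indice_variacao_py; infer_instance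

-- ===== CLAIM (what is proved, stated in full; the proofs are below) =====
def Claim_equal_proximo_indice_variacao_py : Prop := ∀ (base : List (String × List (String × String))) (chave : String), Dom_proximo_indice_variacao_py base chave → Spec_proximo_indice_variacao_py base chave (proximo_indice_variacao_py base chave)

-- ===== LEMMAS AND PROOFS =====

-- membership in the accumulation loop shared in shape by both ports
theorem pv_mem_foldl (c : String → Bool) (keys : List String) (s0 : PySem.Set Int) (y : Int) :
    (y ∈ keys.foldl (fun s k =>
        if c k then
          match pvParse k with
          | some v => PySem.Set.add s v
          | none => s
        else s) s0)
      ↔ y ∈ s0 ∨ ∃ k ∈ keys, c k = true ∧ pvParse k = some y := by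
  induction keys generalizing s0 with
  | nil => simp
  | cons k ks ih =>
    simp only [List.foldl_cons, ih, List.mem_cons]
    by_cases hc : c k = true
    · cases hp : pvParse k with
      | none =>
        simp only [hc, if_true]
        constructor
        · rintro (h | h)
          · exact Or.inl h
          · obtain ⟨k', hk', h1, h2⟩ := h
            exact Or.inr ⟨k', Or.inr hk', h1, h2⟩
        · rintro (h | ⟨k', hk', h1, h2⟩)
          · exact Or.inl h
          · rcases hk' with rfl | hk''
            · rw [hp] at h2; cases h2
            · exact Or.inr ⟨k', hk'', h1, h2⟩
      | some v =>
        simp only [hc, if_true, PySem.Set.mem_add]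
        constructor
        · rintro (⟨h | rfl⟩ | h)
          · exact Or.inl h
          · exact Or.inr ⟨k, Or.inl rfl, hc, hp⟩
          · obtain ⟨k', hk', h1, h2⟩ := h
            exact Or.inr ⟨k', Or.inr hk', h1, h2⟩
        · rintro (h | ⟨k', hk', h1, h2⟩)
          · exact Or.inl (Or.inl h)
          · rcases hk' with rfl | hk''
            · rw [hp] at h2
              exact Or.inl (Or.inr (Option.some_injective _ h2).symm)
            · exact Or.inr ⟨k', hk'', h1, h2⟩
    · have hc' : c k = false := Bool.eq_false_iff.mpr hc
      simp only [hc', Bool.false_eq_true, if_false]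
      constructor
      · rintro (h | ⟨k', hk', h1, h2⟩)
        · exact Or.inl h
        · exact Or.inr ⟨k', Or.inr hk', h1, h2⟩
      · rintro (h | ⟨k', hk', h1, h2⟩)
        · exact Or.inl h
        · rcases hk' with rfl | hk''
          · rw [hc'] at h1; cases h1
          · exact Or.inr ⟨k', hk'', h1, h2⟩

-- the loop preserves Nodup
theorem pv_nodup_foldl (c : String → Bool) (keys : List String) (s0 : PySem.Set Int)
    (h : s0.Nodup) :
    (keys.foldl (fun s k =>
        if c k then
          match pvParse k with
          | some v => PySem.Set.add s v
          | none => s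
        else s) s0).Nodup := by
  induction keys generalizing s0 with
  | nil => exact h
  | cons k ks ih =>
    simp only [List.foldl_cons]
    apply ih
    by_cases hc : c k = true
    · cases hp : pvParse k with
      | none => simpa [hc, hp] using h
      | some v => simpa [hc, hp] using PySem.Set.nodup_add s0 v h
    · simpa [Bool.eq_false_iff.mpr hc] using h

-- A's combined condition coincides with B's single startswith test
theorem pv_cond_eq (chave k : String) :
    ((k == chave || PySem.Str.startswith k (chave ++ "__")) &&
     (!(k == chave) && PySem.Str.isIn "__" k))
      = PySem.Str.startswith k (chave ++ "__") := by
  by_cases he : k = chave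
  · subst he
    have hsw : PySem.Chars.startswith k.toList (k.toList ++ ['_', '_']) = false := by
      apply Bool.eq_false_iff.mpr
      intro hsw
      have hl := ((PySem.Chars.startswith_iff _ _).mp hsw).length_le
      simp at hl
    simp [hsw]
  · cases hsw : PySem.Str.startswith k (chave ++ "__") with
    | false =>
      simp
      intro h; exact absurd h he
    | true =>
      rw [PySem.Str.startswith_eq] at hsw
      have hpre := (PySem.Chars.startswith_iff _ _).mp hsw
      rw [String.toList_append] at hpre
      obtain ⟨t, ht⟩ := hpre
      have hin : PySem.Chars.isIn ['_', '_'] k.toList = true := by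
        have h := (PySem.Str.isIn_iff_infix "__" k).mpr ⟨chave.toList, t, by simpa using ht⟩
        simpa using h
      have hbeq : (k == chave) = false := by
        simp only [beq_eq_false_iff_ne, ne_eq]; exact he
      simp [hbeq, hin]

-- strict-count decrease for the while loop's fuel argument
theorem pv_countP_lt (S : List Int) (n : Int) (hn : n ∈ S) :
    S.countP (fun x => decide (n + 1 ≤ x)) < S.countP (fun x => decide (n ≤ x)) := by
  induction S with
  | nil => cases hn
  | cons a S ih =>
    have hmono : S.countP (fun x => decide (n + 1 ≤ x)) ≤ S.countP (fun x => decide (n ≤ x)) :=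
      List.countP_mono_left (fun x _ hx => by simp at hx ⊢; omega)
    simp only [List.countP_cons]
    rcases List.mem_cons.mp hn with rfl | ha
    · cases hd1 : decide (n + 1 ≤ n) <;> cases hd2 : decide (n ≤ n) <;> simp_all
    · have hih := ih ha
      cases hd1 : decide (n + 1 ≤ a) <;> cases hd2 : decide (n ≤ a) <;> simp_all
      omega

-- specification of A's while loop
theorem pv_whileA_spec (S : PySem.Set Int) :
    ∀ (fuel : Nat) (n : Int), S.countP (fun x => decide (n ≤ x)) < fuel →
      n ≤ pvWhileA S fuel n ∧ pvWhileA S fuel n ∉ S ∧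
        ∀ j, n ≤ j → j < pvWhileA S fuel n → j ∈ S := by
  intro fuel
  induction fuel with
  | zero => intro n h; omega
  | succ fuel ih =>
    intro n h
    by_cases hm : n ∈ S
    · have hc : PySem.Set.contains S n = true := (PySem.Set.contains_iff S n).mpr hm
      have hstep : pvWhileA S (fuel + 1) n = pvWhileA S fuel (n + 1) := by
        simp only [pvWhileA]; rw [hc]; simp
      have hlt : S.countP (fun x => decide (n + 1 ≤ x)) < fuel := by
        have := pv_countP_lt S n hm; omega
      obtain ⟨h1, h2, h3⟩ := ih (n + 1) hlt
      rw [hstep]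
      refine ⟨by omega, h2, ?_⟩
      intro j hj1 hj2
      rcases eq_or_lt_of_le hj1 with rfl | hj1'
      · exact hm
      · exact h3 j (by omega) hj2
    · have hc : PySem.Set.contains S n = false :=
        Bool.eq_false_iff.mpr (fun hcc => hm ((PySem.Set.contains_iff S n).mp hcc))
      have hstep : pvWhileA S (fuel + 1) n = n := by
        simp only [pvWhileA]; rw [hc]; simp
      rw [hstep]
      exact ⟨le_refl n, hm, fun j h1 h2 => absurd h2 (by omega)⟩

-- specification of B's gap scan on a strictly increasing list
theorem pv_scanB_spec (xs : List Int) (hs : xs.Pairwise (· < ·)) :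
    ∀ n : Int, n ≤ pvScanB xs n ∧ pvScanB xs n ∉ xs ∧
      ∀ j, n ≤ j → j < pvScanB xs n → j ∈ xs := by
  induction xs with
  | nil => intro n; refine ⟨le_refl n, by simp [pvScanB], ?_⟩; intro j h1 h2; simp [pvScanB] at h2; omega
  | cons v vs ih =>
    have hvvs : ∀ x ∈ vs, v < x := fun x hx => List.rel_of_pairwise_cons hs hx
    have htail := ih (List.Pairwise.of_cons hs)
    intro n
    by_cases hv : v = n
    · subst hv
      obtain ⟨h1, h2, h3⟩ := htail (v + 1)
      have heq : pvScanB (v :: vs) v = pvScanB vs (v + 1) := by simp [pvScanB]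
      refine ⟨by omega, ?_, ?_⟩
      · rw [heq]; intro hmem
        rcases List.mem_cons.mp hmem with h | h
        · omega
        · exact h2 h
      · intro j hj1 hj2
        rw [heq] at hj2
        rcases eq_or_lt_of_le hj1 with rfl | hj1'
        · exact List.mem_cons_self
        · exact List.mem_cons_of_mem v (h3 j (by omega) hj2)
    · by_cases hgt : v > n
      · have heq : pvScanB (v :: vs) n = n := by simp [pvScanB, hv, hgt]
        refine ⟨by omega, ?_, ?_⟩
        · rw [heq]; intro hmem
          rcases List.mem_cons.mp hmem with h | h
          · omega
          · have := hvvs n h; omega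
        · intro j h1 h2; rw [heq] at h2; omega
      · have hlt : v < n := by omega
        obtain ⟨h1, h2, h3⟩ := htail n
        have heq : pvScanB (v :: vs) n = pvScanB vs n := by
          simp [pvScanB, hv]; omega
        refine ⟨by omega, ?_, ?_⟩
        · rw [heq]; intro hmem
          rcases List.mem_cons.mp hmem with h | h
          · omega
          · exact h2 h
        · intro j hj1 hj2
          rw [heq] at hj2
          exact List.mem_cons_of_mem v (h3 j hj1 hj2)

-- the indices contributed by the keys (both ports accumulate exactly these)
def pvQ (base : List (String × List (String × String))) (chave : String) (y : Int) : Prop :=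
  ∃ k ∈ pvKeys base, PySem.Str.startswith k (chave ++ "__") = true ∧ pvParse k = some y

theorem pv_memA (base : List (String × List (String × String))) (chave : String) (y : Int) :
    (y ∈ (pvPrefixoChaves base chave).foldl
      (fun s k =>
        if (!(k == chave) && PySem.Str.isIn "__" k) then
          match pvParse k with
          | some v => PySem.Set.add s v
          | none => s
        else s)
      (PySem.Set.ofList [0]))
    ↔ y = 0 ∨ pvQ base chave y := by
  constructor
  · intro h
    rcases (pv_mem_foldl (fun k => !(k == chave) && PySem.Str.isIn "__" k)
        (pvPrefixoChaves base chave) (PySem.Set.ofList [0]) y).mp h with h0 | ⟨k, hk, hck, hpk⟩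
    · left; simpa [PySem.Set.ofList] using h0
    · right
      obtain ⟨hk1, hk2⟩ := List.mem_filter.mp hk
      have hb := pv_cond_eq chave k
      rw [show ((k == chave || PySem.Str.startswith k (chave ++ "__")) &&
            (!(k == chave) && PySem.Str.isIn "__" k)) = true by rw [hk2, hck]; rfl] at hb
      exact ⟨k, hk1, hb.symm, hpk⟩
  · rintro (rfl | ⟨k, hk, hsw, hpk⟩)
    · exact (pv_mem_foldl _ _ _ _).mpr (Or.inl (by simp [PySem.Set.ofList]))
    · apply (pv_mem_foldl (fun k => !(k == chave) && PySem.Str.isIn "__" k)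
        (pvPrefixoChaves base chave) (PySem.Set.ofList [0]) y).mpr
      right
      have hb' : ((k == chave || PySem.Str.startswith k (chave ++ "__")) &&
          (!(k == chave) && PySem.Str.isIn "__" k)) = true := by
        rw [pv_cond_eq chave k, hsw]
      obtain ⟨hb1, hb2⟩ := Bool.and_eq_true_iff.mp hb'
      exact ⟨k, List.mem_filter.mpr ⟨hk, hb1⟩, hb2, hpk⟩

theorem pv_memB (base : List (String × List (String × String))) (chave : String) (y : Int) :
    (y ∈ (pvKeys base).foldl
      (fun s k =>
        if PySem.Str.startswith k (chave ++ "__") then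
          match pvParse k with
          | some v => PySem.Set.add s v
          | none => s
        else s)
      PySem.Set.empty)
    ↔ pvQ base chave y := by
  constructor
  · intro h
    rcases (pv_mem_foldl (fun k => PySem.Str.startswith k (chave ++ "__"))
        (pvKeys base) PySem.Set.empty y).mp h with h0 | hq
    · simp [PySem.Set.empty] at h0
    · exact hq
  · intro hq
    exact (pv_mem_foldl (fun k => PySem.Str.startswith k (chave ++ "__"))
        (pvKeys base) PySem.Set.empty y).mpr (Or.inr hq)

-- ===== VERDICT (by name: the statement is the Claim_ definition above) =====
theorem proximo_indice_variacao_py_spec : Claim_equal_proximo_indice_variacao_py := by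
  intro base chave _
  unfold Spec_proximo_indice_variacao_py proximo_indice_variacao_py proximo_indice_variacao_py_alt
  set SA := (pvPrefixoChaves base chave).foldl
      (fun s k =>
        if (!(k == chave) && PySem.Str.isIn "__" k) then
          match pvParse k with
          | some v => PySem.Set.add s v
          | none => s
        else s)
      (PySem.Set.ofList [0]) with hSA
  set SB := (pvKeys base).foldl
      (fun s k =>
        if PySem.Str.startswith k (chave ++ "__") then
          match pvParse k with
          | some v => PySem.Set.add s v
          | none => s
        else s)
      PySem.Set.empty with hSB
  have hmemA : ∀ y : Int, y ∈ SA ↔ y = 0 ∨ pvQ base chave y := fun y => pv_memA base chave y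
  have hmemB : ∀ y : Int, y ∈ SB ↔ pvQ base chave y := fun y => pv_memB base chave y
  have hA := pv_whileA_spec SA (SA.length + 1) 1
    (by have := List.countP_le_length (p := fun x => decide ((1:Int) ≤ x)) (l := SA); omega)
  have hnodupB : SB.Nodup := pv_nodup_foldl _ _ _ (by simp [PySem.Set.empty])
  have hsorted : (PySem.List.sorted SB (fun x => x) false).Pairwise (· < ·) := by
    have hle := PySem.List.sorted_pairwise SB (fun x : Int => x)
    have hnd : (PySem.List.sorted SB (fun x => x) false).Nodup :=
      (PySem.List.sorted_perm SB (fun x : Int => x) false).nodup_iff.mpr hnodupB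
    exact (List.Pairwise.and hle hnd).imp (fun h => lt_of_le_of_ne h.1 h.2)
  have hB := pv_scanB_spec _ hsorted 1
  obtain ⟨ha1, ha2, ha3⟩ := hA
  obtain ⟨hb1, hb2, hb3⟩ := hB
  set a := pvWhileA SA (SA.length + 1) 1 with hva
  set b := pvScanB (PySem.List.sorted SB (fun x => x) false) 1 with hvb
  have hQa : ¬ pvQ base chave a := fun hq => ha2 ((hmemA a).mpr (Or.inr hq))
  have hQb : ¬ pvQ base chave b := fun hq => by
    apply hb2
    rw [PySem.List.mem_sorted]
    exact (hmemB b).mpr hq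
  have hQa' : ∀ j, 1 ≤ j → j < a → pvQ base chave j := by
    intro j h1 h2
    rcases (hmemA j).mp (ha3 j h1 h2) with rfl | h
    · omega
    · exact h
  have hQb' : ∀ j, 1 ≤ j → j < b → pvQ base chave j := by
    intro j h1 h2
    have hmem := hb3 j h1 h2
    rw [PySem.List.mem_sorted] at hmem
    exact (hmemB j).mp hmem
  rcases lt_trichotomy a b with h | h | h
  · exact absurd (hQb' a ha1 h) hQa
  · exact h
  · exact absurd (hQa' b hb1 h) hQb
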